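-- pv_equiv track=rewrite | github.com/jkoufopoulos/shopq-prototype | scripts/evals/tools/client_label_review_tool.py | get_taxonomy_hint
-- ===== SOURCE A (Python) =====
-- def get_taxonomy_hint(subject: str, snippet: str, email_type: str, importance: str) -> str:
--     """Return taxonomy guidance based on email patterns and classification"""
--     subject_lower = subject.lower()
--     hints = []
--
--     # Rule 1: type=receipt -> receipts
--     if email_type == "receipt":
--         hints.append("Rule: type=receipt -> receipts (all purchase lifecycle)")
--
--     # Rule 2: type=message -> messages
--     if email_type == "message":
--         hints.append("Rule: type=message -> messages (human conversations)")
--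
--     # Rule 3: importance=critical -> action-required
--     if importance == "critical":
--         hints.append("Rule: importance=critical -> action-required (user must act)")
--
--     # Rule 4: type=otp -> everything-else (despite being critical)
--     if email_type == "otp":
--         hints.append(
--             "Rule: type=otp -> everything-else (OTPs are ephemeral, don't need special handling)"
--         )
--
--     # Common patterns
--     if any(
--         word in subject_lower
--         for word in ["order", "shipped", "delivered", "invoice", "payment", "receipt"]
--     ):
--         hints.append("Pattern: Purchase/shipping/payment emails -> receipts")
--
--     if any(
--         word in subject_lower
--         for word in ["security alert", "unauthorized", "verify your", "action required"]
--     ):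
--         hints.append("Pattern: Security/action-needed emails -> action-required")
--
--     if any(
--         word in subject_lower
--         for word in ["newsletter", "digest", "weekly", "promo", "% off", "sale"]
--     ):
--         hints.append("Pattern: Marketing/newsletter emails -> everything-else")
--
--     return "\n".join(hints) if hints else "No specific taxonomy rule matched"
-- ===== SOURCE B (Python) =====
-- def get_taxonomy_hint(subject: str, snippet: str, email_type: str, importance: str) -> str:
--     """Return taxonomy guidance based on email patterns and classification"""
--     subject_lower = subject.lower()
--     rules = [
--         (email_type == "receipt",
--          "Rule: type=receipt -> receipts (all purchase lifecycle)"),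
--         (email_type == "message",
--          "Rule: type=message -> messages (human conversations)"),
--         (importance == "critical",
--          "Rule: importance=critical -> action-required (user must act)"),
--         (email_type == "otp",
--          "Rule: type=otp -> everything-else (OTPs are ephemeral, don't need special handling)"),
--         (any(w in subject_lower for w in
--              ["order", "shipped", "delivered", "invoice", "payment", "receipt"]),
--          "Pattern: Purchase/shipping/payment emails -> receipts"),
--         (any(w in subject_lower for w in
--              ["security alert", "unauthorized", "verify your", "action required"]),
--          "Pattern: Security/action-needed emails -> action-required"),
--         (any(w in subject_lower for w in
--              ["newsletter", "digest", "weekly", "promo", "% off", "sale"]),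
--          "Pattern: Marketing/newsletter emails -> everything-else"),
--     ]
--
--     def render(rs):
--         # Recursively build the newline-joined text of the fired rules,
--         # or None when no rule in rs fired.
--         if not rs:
--             return None
--         fired, hint = rs[0]
--         rest = render(rs[1:])
--         if not fired:
--             return rest
--         return hint if rest is None else hint + "\n" + rest
--
--     text = render(rules)
--     return text if text is not None else "No specific taxonomy rule matched"
-- ===== Notes on version B (the rewrite author's own statement) =====
-- stated objective: alternative
-- what changed: Replaced the iterative append-to-list-then-join construction by a recursive renderer over a (fired, hint) rule list that builds the newline-joined result string directly (Option/None signalling 'no rule fired'), with no intermediate hints list and no join call.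
import Mathlib
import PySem

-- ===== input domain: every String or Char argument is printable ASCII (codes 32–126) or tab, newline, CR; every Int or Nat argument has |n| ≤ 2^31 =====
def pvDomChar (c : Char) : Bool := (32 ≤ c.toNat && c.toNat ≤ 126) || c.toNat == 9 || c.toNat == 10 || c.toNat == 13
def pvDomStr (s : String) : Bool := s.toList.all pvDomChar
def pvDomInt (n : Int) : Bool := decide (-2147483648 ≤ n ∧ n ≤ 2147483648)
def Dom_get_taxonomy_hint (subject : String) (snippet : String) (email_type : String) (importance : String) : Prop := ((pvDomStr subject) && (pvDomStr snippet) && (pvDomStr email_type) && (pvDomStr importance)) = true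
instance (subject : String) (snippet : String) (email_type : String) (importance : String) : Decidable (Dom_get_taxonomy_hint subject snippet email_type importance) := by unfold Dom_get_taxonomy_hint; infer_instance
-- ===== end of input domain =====

-- B replaces A's append-to-list-then-join construction by a recursive renderer that
-- builds the newline-joined string directly (none = no rule fired); same return value.

-- ===== PORT A =====
def get_taxonomy_hint (subject : String) (snippet : String) (email_type : String) (importance : String) : String :=
  let subject_lower := PySem.Str.lower subject
  let hints : List String := []
  let hints := if email_type = "receipt" then hints ++ ["Rule: type=receipt -> receipts (all purchase lifecycle)"] else hints
  let hints := if email_type = "message" then hints ++ ["Rule: type=message -> messages (human conversations)"] else hints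
  let hints := if importance = "critical" then hints ++ ["Rule: importance=critical -> action-required (user must act)"] else hints
  let hints := if email_type = "otp" then hints ++ ["Rule: type=otp -> everything-else (OTPs are ephemeral, don't need special handling)"] else hints
  let hints := if (["order", "shipped", "delivered", "invoice", "payment", "receipt"].any (fun w => PySem.Str.isIn w subject_lower)) then hints ++ ["Pattern: Purchase/shipping/payment emails -> receipts"] else hints
  let hints := if (["security alert", "unauthorized", "verify your", "action required"].any (fun w => PySem.Str.isIn w subject_lower)) then hints ++ ["Pattern: Security/action-needed emails -> action-required"] else hints
  let hints := if (["newsletter", "digest", "weekly", "promo", "% off", "sale"].any (fun w => PySem.Str.isIn w subject_lower)) then hints ++ ["Pattern: Marketing/newsletter emails -> everything-else"] else hints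
  if hints ≠ [] then PySem.Str.join "\n" hints else "No specific taxonomy rule matched"

-- ===== PORT B =====
-- recursive renderer over the rule list: builds the joined text directly, none = nothing fired
def pvRender : List (Bool × String) → Option String
  | [] => none
  | (fired, hint) :: rs =>
    let rest := pvRender rs
    if !fired then rest
    else match rest with
      | none => some hint
      | some t => some (hint ++ "\n" ++ t)

def get_taxonomy_hint_alt (subject : String) (snippet : String) (email_type : String) (importance : String) : String :=
  let subject_lower := PySem.Str.lower subject
  let rules : List (Bool × String) :=
    [(email_type == "receipt", "Rule: type=receipt -> receipts (all purchase lifecycle)"),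
     (email_type == "message", "Rule: type=message -> messages (human conversations)"),
     (importance == "critical", "Rule: importance=critical -> action-required (user must act)"),
     (email_type == "otp", "Rule: type=otp -> everything-else (OTPs are ephemeral, don't need special handling)"),
     (["order", "shipped", "delivered", "invoice", "payment", "receipt"].any (fun w => PySem.Str.isIn w subject_lower),
      "Pattern: Purchase/shipping/payment emails -> receipts"),
     (["security alert", "unauthorized", "verify your", "action required"].any (fun w => PySem.Str.isIn w subject_lower),
      "Pattern: Security/action-needed emails -> action-required"),
     (["newsletter", "digest", "weekly", "promo", "% off", "sale"].any (fun w => PySem.Str.isIn w subject_lower),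
      "Pattern: Marketing/newsletter emails -> everything-else")]
  match pvRender rules with
  | some t => t
  | none => "No specific taxonomy rule matched"

-- ===== PRECONDITION & SPEC =====
def Spec_get_taxonomy_hint (subject : String) (snippet : String) (email_type : String) (importance : String) (out : String) : Prop := out = get_taxonomy_hint_alt subject snippet email_type importance
instance (subject : String) (snippet : String) (email_type : String) (importance : String) (out : String) : Decidable (Spec_get_taxonomy_hint subject snippet email_type importance out) := by unfold Spec_get_taxonomy_hint; infer_instance

-- ===== CLAIM =====
def Claim_equal_get_taxonomy_hint : Prop := ∀ (subject : String) (snippet : String) (email_type : String) (importance : String), Dom_get_taxonomy_hint subject snippet email_type importance → Spec_get_taxonomy_hint subject snippet email_type importance (get_taxonomy_hint subject snippet email_type importance)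

-- ===== LEMMAS AND PROOFS =====
-- pvRender computes exactly "join of the fired hints" (none when no rule fired)
theorem pvRender_eq (rs : List (Bool × String)) :
    pvRender rs = (if h : ((rs.filter (·.1)).map (·.2)) = [] then none
                   else some (PySem.Str.join "\n" ((rs.filter (·.1)).map (·.2)))) := by
  induction rs with
  | nil => simp [pvRender]
  | cons p rs ih =>
    obtain ⟨fired, hint⟩ := p
    cases fired with
    | false => simpa [pvRender] using ih
    | true =>
      simp only [pvRender, ih, Bool.not_true]
      rcases h : (rs.filter (·.1)).map (·.2) with _ | ⟨y, ys⟩ <;>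
        simp [h, PySem.Str.join, PySem.Chars.join, String.ext_iff, List.intercalate, List.intersperse, List.flatten]

-- ===== VERDICT =====
set_option maxHeartbeats 2000000 in
theorem get_taxonomy_hint_spec : Claim_equal_get_taxonomy_hint := by
  intro subject snippet email_type importance _
  unfold Spec_get_taxonomy_hint get_taxonomy_hint get_taxonomy_hint_alt
  simp only [pvRender_eq]
  by_cases h1 : email_type = "receipt" <;>
  by_cases h2 : email_type = "message" <;>
  by_cases h3 : importance = "critical" <;>
  by_cases h4 : email_type = "otp" <;>
  by_cases h5 : (["order", "shipped", "delivered", "invoice", "payment", "receipt"].any (fun w => PySem.Str.isIn w (PySem.Str.lower subject))) = true <;>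
  by_cases h6 : (["security alert", "unauthorized", "verify your", "action required"].any (fun w => PySem.Str.isIn w (PySem.Str.lower subject))) = true <;>
  by_cases h7 : (["newsletter", "digest", "weekly", "promo", "% off", "sale"].any (fun w => PySem.Str.isIn w (PySem.Str.lower subject))) = true <;>
  simp_all
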